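-- pv_equiv track=rewrite | github.com/annaulazar/algorithms_practice | Trenirovka_6_0/lecture_3/task_g-stress.py | primitive_func
-- ===== SOURCE A (Python) =====
-- from collections import deque
--
-- def primitive_func(minutes: int, cnt_by_minute: int, arr: list[int]) -> int:
--     res = 0
--     que = deque()
--     for minute in range(minutes):
--         cnt = cnt_by_minute
--         while que and cnt > 0:
--             res += minute - que.popleft() + 1
--             cnt -= 1
--         current = arr[minute]
--         if current > cnt:
--             current -= cnt
--             res += cnt
--             while current:
--                 que.append(minute)
--                 current -= 1
--         else:
--             res += current
--     for ost in que:
--         res += minutes - ost + 1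
--     return res
-- ===== SOURCE B (Python) =====
-- def primitive_func(minutes: int, cnt_by_minute: int, arr: list[int]) -> int:
--     # No queue at all: track only scalars P (total ever enqueued) and T (total
--     # served from the queue).  Waiting times are accounted as presence counts:
--     # each minute adds the current backlog P - T, and at the end each enqueued
--     # item gets its +1 and the final backlog its last minute.
--     cap = max(cnt_by_minute, 0)
--     res = 0
--     P = 0
--     T = 0
--     for m in range(minutes):
--         res += P - T
--         s = min(P - T, cap)
--         T += s
--         left = cnt_by_minute - s
--         a = arr[m]
--         if a > left:
--             res += left
--             P += a - left
--         else:
--             res += a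
--     return res + (P - T) + P
-- ===== Notes on version B (the rewrite author's own statement) =====
-- stated objective: faster
-- what changed: B removes the queue entirely: it keeps only two scalars (total enqueued, total served) and accounts waiting times as per-minute backlog presence counts plus a final closed-form correction, instead of pushing/popping one queue entry per request.
import Mathlib
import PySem

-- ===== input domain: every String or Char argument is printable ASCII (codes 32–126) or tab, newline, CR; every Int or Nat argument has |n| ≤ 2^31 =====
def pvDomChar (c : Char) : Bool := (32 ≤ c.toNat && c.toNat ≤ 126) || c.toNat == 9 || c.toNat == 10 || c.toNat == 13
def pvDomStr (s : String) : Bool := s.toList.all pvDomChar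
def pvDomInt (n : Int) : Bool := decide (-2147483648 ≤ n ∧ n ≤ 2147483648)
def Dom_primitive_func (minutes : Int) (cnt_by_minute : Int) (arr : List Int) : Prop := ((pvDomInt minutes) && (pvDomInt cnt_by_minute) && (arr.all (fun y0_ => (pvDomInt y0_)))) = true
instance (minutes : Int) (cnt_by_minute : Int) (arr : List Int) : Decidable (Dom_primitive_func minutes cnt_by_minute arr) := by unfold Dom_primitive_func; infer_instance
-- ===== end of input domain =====

-- B drops the per-request deque entirely: scalar backlog arithmetic (total enqueued,
-- total served) with presence-count accounting; asymptotically faster. Return value only.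


-- ===== PORT A =====
-- inner 'while que and cnt > 0' loop: pops one arrival at a time
def pfServe (m : Int) : List Int → Int → Int → List Int × Int × Int
  | [], cnt, res => ([], cnt, res)
  | t :: rest, cnt, res =>
    if cnt > 0 then pfServe m rest (cnt - 1) (res + (m - t + 1))
    else (t :: rest, cnt, res)

-- 'while current: que.append(minute); current -= 1' (current is positive there):
-- appends current copies of minute, one per iteration
def pfPush (m : Int) (n : Nat) (que : List Int) : List Int :=
  que ++ List.replicate n m

-- one iteration of the 'for minute in range(minutes)' loop
def pfStep (cbm : Int) (arr : List Int) (st : List Int × Int) (minute : Int) : List Int × Int :=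
  let r := pfServe minute st.1 cbm st.2
  let current := (PySem.List.pyGet? arr minute).getD 0   -- in range inside Pre_
  if current > r.2.1 then (pfPush minute (current - r.2.1).toNat r.1, r.2.2 + r.2.1)
  else (r.1, r.2.2 + current)

def primitive_func (minutes : Int) (cnt_by_minute : Int) (arr : List Int) : Int :=
  let st := (PySem.List.pyRange 0 minutes 1).foldl (pfStep cnt_by_minute arr) ([], 0)
  st.1.foldl (fun r ost => r + (minutes - ost + 1)) st.2

-- ===== PORT B =====
-- B's loop body: state is (res, P, T) with P = total ever enqueued, T = total served
def pfAltStep (cbm cap : Int) (arr : List Int) (st : Int × Int × Int) (m : Int) : Int × Int × Int :=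
  let res := st.1 + (st.2.1 - st.2.2)
  let s := min (st.2.1 - st.2.2) cap
  let T := st.2.2 + s
  let left := cbm - s
  let a := (PySem.List.pyGet? arr m).getD 0   -- in range inside Pre_
  if a > left then (res + left, st.2.1 + (a - left), T) else (res + a, st.2.1, T)

def primitive_func_alt (minutes : Int) (cnt_by_minute : Int) (arr : List Int) : Int :=
  let cap := max cnt_by_minute 0
  let st := (PySem.List.pyRange 0 minutes 1).foldl (pfAltStep cnt_by_minute cap arr) (0, 0, 0)
  st.1 + (st.2.1 - st.2.2) + st.2.1

-- ===== PRECONDITION & SPEC =====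
-- Pre_ excludes exactly the inputs where A raises IndexError at arr[minute] (minutes > len(arr)).
def Pre_primitive_func (minutes : Int) (cnt_by_minute : Int) (arr : List Int) : Prop :=
  minutes ≤ (arr.length : Int)
instance (minutes : Int) (cnt_by_minute : Int) (arr : List Int) : Decidable (Pre_primitive_func minutes cnt_by_minute arr) := by unfold Pre_primitive_func; infer_instance

def pvWitness_primitive_func : Int × Int × List Int := (3, 2, [5, 0, 1])

def Spec_primitive_func (minutes : Int) (cnt_by_minute : Int) (arr : List Int) (out : Int) : Prop := out = primitive_func_alt minutes cnt_by_minute arr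
instance (minutes : Int) (cnt_by_minute : Int) (arr : List Int) (out : Int) : Decidable (Spec_primitive_func minutes cnt_by_minute arr out) := by unfold Spec_primitive_func; infer_instance

-- ===== CLAIM (what is proved, stated in full; the proofs are below) =====
def Claim_equal_primitive_func : Prop := ∀ (minutes : Int) (cnt_by_minute : Int) (arr : List Int), Dom_primitive_func minutes cnt_by_minute arr → Pre_primitive_func minutes cnt_by_minute arr → Spec_primitive_func minutes cnt_by_minute arr (primitive_func minutes cnt_by_minute arr)

-- ===== LEMMAS AND PROOFS =====

-- sum of an affine map over a list
lemma sum_affine (m : Int) : ∀ (l : List Int),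
    (l.map (fun t => m - t + 1)).sum = (m + 1) * l.length - l.sum := by
  intro l
  induction l with
  | nil => simp
  | cons t rest ih =>
    simp [ih]
    ring

-- A's serving loop pops exactly min(len, cnt⁺) items from the front
lemma serve_char (m : Int) : ∀ (que : List Int) (cnt res : Int),
    pfServe m que cnt res =
      (que.drop (min que.length cnt.toNat), cnt - min que.length cnt.toNat,
       res + ((que.take (min que.length cnt.toNat)).map (fun t => m - t + 1)).sum) := by
  intro que
  induction que with
  | nil => intro cnt res; simp [pfServe]
  | cons t rest ih =>
    intro cnt res
    by_cases h : cnt > 0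
    · rw [show pfServe m (t :: rest) cnt res =
            if cnt > 0 then pfServe m rest (cnt - 1) (res + (m - t + 1))
            else (t :: rest, cnt, res) from rfl, if_pos h, ih]
      have hk : min (t :: rest).length cnt.toNat = (min rest.length (cnt - 1).toNat) + 1 := by
        simp only [List.length_cons]; omega
      rw [hk]
      simp only [Prod.mk.injEq, List.drop_succ_cons, List.take_succ_cons, List.map_cons,
        List.sum_cons]
      refine ⟨trivial, by push_cast; omega, by ring⟩
    · rw [show pfServe m (t :: rest) cnt res =
            if cnt > 0 then pfServe m rest (cnt - 1) (res + (m - t + 1))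
            else (t :: rest, cnt, res) from rfl, if_neg h]
      have : min (t :: rest).length cnt.toNat = 0 := by omega
      rw [this]
      simp

-- the per-minute invariant step: lengths match and the results differ by the
-- closed-form correction T - (m-1)*(P-T) + Σ que
lemma step_inv (C : Int) (arr : List Int) (que : List Int) (rA rB P T m : Int)
    (h1 : (que.length : Int) = P - T)
    (h2 : rA = rB + T - (m - 1) * (P - T) + que.sum) :
    ((pfStep C arr (que, rA) m).1.length : Int)
        = (pfAltStep C (max C 0) arr (rB, P, T) m).2.1 - (pfAltStep C (max C 0) arr (rB, P, T) m).2.2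
    ∧ (pfStep C arr (que, rA) m).2
        = (pfAltStep C (max C 0) arr (rB, P, T) m).1
          + (pfAltStep C (max C 0) arr (rB, P, T) m).2.2
          - m * ((pfAltStep C (max C 0) arr (rB, P, T) m).2.1
                 - (pfAltStep C (max C 0) arr (rB, P, T) m).2.2)
          + (pfStep C arr (que, rA) m).1.sum := by
  unfold pfStep pfAltStep
  rw [serve_char]
  dsimp only
  set a := (PySem.List.pyGet? arr m).getD 0 with ha
  set k : Nat := min que.length C.toNat with hk
  have hs : min (P - T) (max C 0) = (k : Int) := by
    rw [hk]; push_cast; omega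
  have hks : ((que.take k).map (fun t => m - t + 1)).sum
      = (m + 1) * k - (que.take k).sum := by
    rw [sum_affine, List.length_take]
    congr 2
    omega
  have hsplit : (que.take k).sum + (que.drop k).sum = que.sum := by
    rw [← List.sum_append, List.take_append_drop]
  rw [hs, hks]
  by_cases hgt : a > C - k
  · rw [if_pos hgt, if_pos hgt]
    simp only [pfPush]
    have hc : ((a - (C - (k : Int))).toNat : Int) = a - (C - k) := by omega
    constructor
    · rw [List.length_append, List.length_replicate]
      have hd : ((que.drop k).length : Int) = (que.length : Int) - k := by
        rw [List.length_drop]; omega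
      push_cast
      omega
    · rw [List.sum_append, List.sum_replicate, nsmul_eq_mul, hc]
      linear_combination h2 - hsplit
  · rw [if_neg hgt, if_neg hgt]
    constructor
    · rw [List.length_drop]; push_cast; omega
    · linear_combination h2 - hsplit

-- fold the invariant over a consecutive range of minutes
lemma fold_inv (C : Int) (arr : List Int) : ∀ (n : Nat) (a : Int) (que : List Int) (rA rB P T : Int),
    (que.length : Int) = P - T →
    rA = rB + T - (a - 1) * (P - T) + que.sum →
    (((PySem.List.pyRange a (a + n) 1).foldl (pfStep C arr) (que, rA)).1.length : Int)
        = ((PySem.List.pyRange a (a + n) 1).foldl (pfAltStep C (max C 0) arr) (rB, P, T)).2.1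
          - ((PySem.List.pyRange a (a + n) 1).foldl (pfAltStep C (max C 0) arr) (rB, P, T)).2.2
    ∧ ((PySem.List.pyRange a (a + n) 1).foldl (pfStep C arr) (que, rA)).2
        = ((PySem.List.pyRange a (a + n) 1).foldl (pfAltStep C (max C 0) arr) (rB, P, T)).1
          + ((PySem.List.pyRange a (a + n) 1).foldl (pfAltStep C (max C 0) arr) (rB, P, T)).2.2
          - (a + n - 1) * (((PySem.List.pyRange a (a + n) 1).foldl (pfAltStep C (max C 0) arr) (rB, P, T)).2.1
                           - ((PySem.List.pyRange a (a + n) 1).foldl (pfAltStep C (max C 0) arr) (rB, P, T)).2.2)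
          + (((PySem.List.pyRange a (a + n) 1).foldl (pfStep C arr) (que, rA)).1.sum) := by
  intro n
  induction n with
  | zero =>
    intro a que rA rB P T h1 h2
    rw [show a + (0 : Nat) = a by simp, PySem.List.pyRange_one_eq_nil (le_refl a)]
    simp only [List.foldl_nil]
    exact ⟨h1, by linarith [h2]⟩
  | succ n ih =>
    intro a que rA rB P T h1 h2
    have hcons : PySem.List.pyRange a (a + (n + 1 : Nat)) 1
        = a :: PySem.List.pyRange (a + 1) (a + 1 + n) 1 := by
      rw [PySem.List.pyRange_one_cons (by push_cast; omega)]
      congr 1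
      push_cast
      ring
    rw [hcons]
    simp only [List.foldl_cons]
    obtain ⟨g1, g2⟩ := step_inv C arr que rA rB P T a h1 (by linarith [h2])
    have hA : pfStep C arr (que, rA) a
        = ((pfStep C arr (que, rA) a).1, (pfStep C arr (que, rA) a).2) := rfl
    have hB : pfAltStep C (max C 0) arr (rB, P, T) a
        = ((pfAltStep C (max C 0) arr (rB, P, T) a).1,
           (pfAltStep C (max C 0) arr (rB, P, T) a).2.1,
           (pfAltStep C (max C 0) arr (rB, P, T) a).2.2) := rfl
    rw [hA, hB]
    have := ih (a + 1) (pfStep C arr (que, rA) a).1 (pfStep C arr (que, rA) a).2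
        (pfAltStep C (max C 0) arr (rB, P, T) a).1
        (pfAltStep C (max C 0) arr (rB, P, T) a).2.1
        (pfAltStep C (max C 0) arr (rB, P, T) a).2.2
        g1 (by linarith [g2])
    constructor
    · exact this.1
    · have e : a + 1 + (n : Int) - 1 = a + ((n : Nat) + 1 : Nat) - 1 := by push_cast; ring
      rw [← e]
      exact this.2

-- A's final loop over leftovers in closed form
lemma final_fold (M : Int) : ∀ (que : List Int) (res : Int),
    que.foldl (fun r ost => r + (M - ost + 1)) res
      = res + (M + 1) * que.length - que.sum := by
  intro que
  induction que with
  | nil => intro res; simp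
  | cons t rest ih =>
    intro res
    rw [List.foldl_cons, ih]
    push_cast [List.length_cons, List.sum_cons]
    ring

-- ===== VERDICT (by name: the statement is the Claim_ definition above) =====
theorem primitive_func_spec : Claim_equal_primitive_func := by
  intro minutes C arr _ _
  unfold Spec_primitive_func primitive_func primitive_func_alt
  by_cases hm : minutes ≤ 0
  · rw [PySem.List.pyRange_one_eq_nil hm]
    simp
  · have hmn : minutes = 0 + (minutes.toNat : Int) := by omega
    rw [hmn]
    obtain ⟨g1, g2⟩ := fold_inv C arr minutes.toNat 0 [] 0 0 0 0 (by simp) (by simp)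
    rw [final_fold, g1, g2]
    push_cast
    ring
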